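-- pv_equiv track=rewrite | github.com/CanFlyhang/Desktop-Pixel-Pet | tools/design_pets.py | grid_to_pixels
-- ===== SOURCE A (Python) =====
-- def grid_to_pixels(grid_str, char_map, width=32, height=32):
--     lines = [line for line in grid_str.strip().split('\n') if line]
--
--     # Pad or trim to fit height
--     if len(lines) > height:
--         lines = lines[:height]
--
--     # Center vertically if smaller
--     top_pad = (height - len(lines)) // 2
--
--     pixel_rows = []
--
--     # Add top padding
--     for _ in range(top_pad):
--         pixel_rows.append(["bg"] * width)
--
--     for line in lines:
--         row = []
--         # Pad line to match width logic if needed, but we assume fixed width in string or pad with bg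
--         # Let's map char by char
--         # Center horizontally
--         content_len = len(line)
--         left_pad = (width - content_len) // 2
--
--         row_keys = ["bg"] * left_pad
--
--         for char in line:
--             if char in char_map:
--                 row_keys.append(char_map[char])
--             else:
--                 row_keys.append("bg")
--
--         # Fill remaining right
--         while len(row_keys) < width:
--             row_keys.append("bg")
--
--         pixel_rows.append(row_keys[:width])
--
--     # Add bottom padding
--     while len(pixel_rows) < height:
--         pixel_rows.append(["bg"] * width)
--
--     return pixel_rows
-- ===== SOURCE B (Python) =====
-- def grid_to_pixels(grid_str, char_map, width=32, height=32):
--     lines = [ln for ln in grid_str.strip().split('\n') if ln][:height]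
--     top = (height - len(lines)) // 2
--
--     def cell(r, c):
--         i = r - top
--         if 0 <= i < len(lines):
--             line = lines[i]
--             j = c - max((width - len(line)) // 2, 0)
--             if 0 <= j < len(line):
--                 return char_map.get(line[j], "bg")
--         return "bg"
--
--     return [[cell(r, c) for c in range(width)] for r in range(height)]
-- ===== Notes on version B (the rewrite author's own statement) =====
-- stated objective: simpler
-- what changed: B computes each cell of the height x width canvas directly by an index formula (row/column offsets into the trimmed lines) instead of A's sequential row building with padding lists, a char-append loop, a right-fill while loop and a final truncation.
-- outside the precondition, e.g. on grid_to_pixels('ab', {'a': 'k'}, -1, 2): A returns [['k'], []], B returns [[], []]; on grid_to_pixels('a\nb\nc', {}, 2, -1): A returns [['bg', 'bg'], ['bg', 'bg']], B returns []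
import Mathlib
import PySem

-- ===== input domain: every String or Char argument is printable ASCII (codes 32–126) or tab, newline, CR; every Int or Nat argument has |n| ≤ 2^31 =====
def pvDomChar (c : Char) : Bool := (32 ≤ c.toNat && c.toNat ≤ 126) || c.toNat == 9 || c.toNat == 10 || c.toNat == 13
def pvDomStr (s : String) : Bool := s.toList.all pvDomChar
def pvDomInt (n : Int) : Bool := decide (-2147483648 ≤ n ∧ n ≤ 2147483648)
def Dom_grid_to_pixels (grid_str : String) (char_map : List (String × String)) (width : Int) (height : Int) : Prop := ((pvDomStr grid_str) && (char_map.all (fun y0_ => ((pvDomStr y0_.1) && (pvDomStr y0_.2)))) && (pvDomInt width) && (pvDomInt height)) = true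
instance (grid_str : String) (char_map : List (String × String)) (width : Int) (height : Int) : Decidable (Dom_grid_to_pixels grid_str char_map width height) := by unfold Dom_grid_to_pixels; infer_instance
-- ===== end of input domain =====

-- B pastes nothing and pads nothing: it computes every cell of the height×width canvas by an index formula; proved equal to A for width ≥ 0 and height ≥ 0 (objective: simpler).

-- ===== PORT A =====
-- 'while len(row_keys) < width: row_keys.append("bg")'
def pvPadRow (row : List String) (width : Int) : List String :=
  if (row.length : Int) < width then pvPadRow (row ++ ["bg"]) width else row
termination_by (width - row.length).toNat
decreasing_by simp [List.length_append]; omega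

-- 'while len(pixel_rows) < height: pixel_rows.append(["bg"] * width)'
def pvPadRows (rows : List (List String)) (width height : Int) : List (List String) :=
  if (rows.length : Int) < height then pvPadRows (rows ++ [List.replicate width.toNat "bg"]) width height else rows
termination_by (height - rows.length).toNat
decreasing_by simp [List.length_append]; omega

-- the body of A's 'for line in lines' loop
def pvRowA (cm : PySem.Dict String String) (width : Int) (line : String) : List String :=
  let cs := line.toList
  let content_len : Int := (cs.length : Int)
  let left_pad := PySem.Int.floordiv (width - content_len) 2
  let row0 := List.replicate left_pad.toNat "bg"
  let row1 := cs.foldl (fun rk c =>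
      if cm.contains (String.ofList [c]) then rk ++ [cm.getD (String.ofList [c]) "bg"] else rk ++ ["bg"]) row0
  PySem.List.slice (pvPadRow row1 width) none (some width)

def grid_to_pixels (grid_str : String) (char_map : List (String × String)) (width : Int) (height : Int) : List (List String) :=
  let cm := PySem.Dict.ofList char_map
  let lines0 := (((PySem.Str.split? (PySem.Str.strip grid_str) "\n").getD [])).filter (fun l => l ≠ "")
  let lines := if height < (lines0.length : Int) then PySem.List.slice lines0 none (some height) else lines0
  let top_pad := PySem.Int.floordiv (height - (lines.length : Int)) 2
  let rows0 := (PySem.List.pyRange 0 top_pad 1).foldl (fun acc _ => acc ++ [List.replicate width.toNat "bg"]) []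
  let rows1 := lines.foldl (fun acc line => acc ++ [pvRowA cm width line]) rows0
  pvPadRows rows1 width height

-- ===== PORT B =====
-- B's nested 'cell(r, c)'
def pvCellB (cm : PySem.Dict String String) (lines : List String) (top width : Int) (r c : Int) : String :=
  let i := r - top
  if 0 ≤ i ∧ i < (lines.length : Int) then
    let cs := (PySem.List.pyGetD lines i "").toList
    let j := c - max (PySem.Int.floordiv (width - (cs.length : Int)) 2) 0
    if 0 ≤ j ∧ j < (cs.length : Int) then cm.getD (String.ofList [PySem.List.pyGetD cs j ' ']) "bg" else "bg"
  else "bg"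

def grid_to_pixels_alt (grid_str : String) (char_map : List (String × String)) (width : Int) (height : Int) : List (List String) :=
  let cm := PySem.Dict.ofList char_map
  let lines := PySem.List.slice ((((PySem.Str.split? (PySem.Str.strip grid_str) "\n").getD [])).filter (fun l => l ≠ "")) none (some height)
  let top := PySem.Int.floordiv (height - (lines.length : Int)) 2
  (PySem.List.pyRange 0 height 1).map (fun r =>
    (PySem.List.pyRange 0 width 1).map (fun c => pvCellB cm lines top width r c))

-- ===== PRECONDITION & SPEC =====
-- Pre_ restricts to the natural domain of a pixel canvas: negative width/height (where A's values come from
-- Python's negative-slice accidents and B naturally returns empty rows/canvas) are excluded.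
def Pre_grid_to_pixels (grid_str : String) (char_map : List (String × String)) (width : Int) (height : Int) : Prop :=
  0 ≤ width ∧ 0 ≤ height
instance (grid_str : String) (char_map : List (String × String)) (width : Int) (height : Int) : Decidable (Pre_grid_to_pixels grid_str char_map width height) := by unfold Pre_grid_to_pixels; infer_instance
def pvWitness_grid_to_pixels : String × (List (String × String)) × Int × Int := ("ab\ncd", [("a", "skin")], 4, 4)
def Spec_grid_to_pixels (grid_str : String) (char_map : List (String × String)) (width : Int) (height : Int) (out : List (List String)) : Prop := out = grid_to_pixels_alt grid_str char_map width height
instance (grid_str : String) (char_map : List (String × String)) (width : Int) (height : Int) (out : List (List String)) : Decidable (Spec_grid_to_pixels grid_str char_map width height out) := by unfold Spec_grid_to_pixels; infer_instance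

-- ===== CLAIM (what is proved, stated in full; the proofs are below) =====
def Claim_equal_grid_to_pixels : Prop := ∀ (grid_str : String) (char_map : List (String × String)) (width : Int) (height : Int), Dom_grid_to_pixels grid_str char_map width height → Pre_grid_to_pixels grid_str char_map width height → Spec_grid_to_pixels grid_str char_map width height (grid_to_pixels grid_str char_map width height)

-- ===== LEMMAS AND PROOFS =====

theorem pvPadRow_eq (row : List String) (width : Int) :
    pvPadRow row width = row ++ List.replicate (width.toNat - row.length) "bg" := by
  fun_induction pvPadRow row width with
  | case1 row h ih =>
      rw [ih]
      have h2 : width.toNat - row.length = (width.toNat - (row ++ ["bg"]).length) + 1 := by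
        simp; omega
      rw [h2, List.replicate_succ, List.append_assoc]
      simp
  | case2 row h =>
      have : width.toNat - row.length = 0 := by omega
      simp [this]

theorem pvPadRows_eq (rows : List (List String)) (width height : Int) :
    pvPadRows rows width height = rows ++ List.replicate (height.toNat - rows.length) (List.replicate width.toNat "bg") := by
  fun_induction pvPadRows rows width height with
  | case1 rows h ih =>
      rw [ih]
      have h2 : height.toNat - rows.length = (height.toNat - (rows ++ [List.replicate width.toNat "bg"]).length) + 1 := by
        simp; omega
      rw [h2, List.replicate_succ, List.append_assoc]
      simp
  | case2 rows h =>
      have : height.toNat - rows.length = 0 := by omega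
      simp [this]

theorem pvGetD_if (cm : PySem.Dict String String) (k : String) :
    (if cm.contains k then cm.getD k "bg" else "bg") = cm.getD k "bg" := by
  by_cases h : cm.contains k
  · simp [h]
  · simp [h, PySem.Dict.getD_of_not_contains cm (k := k) "bg" (by simpa using h)]

theorem pvRowA_eq (cm : PySem.Dict String String) (w : Int) (hw : 0 ≤ w) (line : String) :
    pvRowA cm w line =
      List.take w.toNat
        (List.replicate (PySem.Int.floordiv (w - (line.toList.length : Int)) 2).toNat "bg"
          ++ line.toList.map (fun c => cm.getD (String.ofList [c]) "bg")
          ++ List.replicate (w.toNat - ((PySem.Int.floordiv (w - (line.toList.length : Int)) 2).toNat + line.toList.length)) "bg") := by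
  simp only [pvRowA]
  have hbody : (fun (rk : List String) (c : Char) =>
      if cm.contains (String.ofList [c]) then rk ++ [cm.getD (String.ofList [c]) "bg"] else rk ++ ["bg"])
      = (fun rk c => rk ++ [if cm.contains (String.ofList [c]) then cm.getD (String.ofList [c]) "bg" else "bg"]) := by
    funext rk c; split <;> rfl
  rw [hbody, PySem.List.foldl_append_singleton_eq_map]
  have hmap : (line.toList.map fun c =>
      if cm.contains (String.ofList [c]) then cm.getD (String.ofList [c]) "bg" else "bg")
      = line.toList.map (fun c => cm.getD (String.ofList [c]) "bg") := by
    apply List.map_congr_left; intro c _; exact pvGetD_if cm (String.ofList [c])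
  rw [hmap, pvPadRow_eq, PySem.List.slice_to _ hw]
  simp [List.append_assoc]

theorem pvRowB_bg (cm : PySem.Dict String String) (L : List String) (top w r : Int)
    (h : ¬ (0 ≤ r - top ∧ r - top < (L.length : Int))) :
    (PySem.List.pyRange 0 w 1).map (fun c => pvCellB cm L top w r c) = List.replicate w.toNat "bg" := by
  have hconst : ∀ c ∈ PySem.List.pyRange 0 w 1, pvCellB cm L top w r c = "bg" := by
    intro c _
    simp only [pvCellB]
    rw [if_neg h]
  rw [List.map_congr_left hconst, List.map_const']
  simp [PySem.List.length_pyRange_one]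

theorem pvRowB_eq_rowA (cm : PySem.Dict String String) (L : List String) (T : Nat) (w : Int)
    (hw : 0 ≤ w) (k : Nat) (hk : k < L.length) :
    (PySem.List.pyRange 0 w 1).map (fun c => pvCellB cm L (T : Int) w ((T : Int) + (k : Int)) c)
      = pvRowA cm w L[k] := by
  rw [pvRowA_eq cm w hw]
  set cs := L[k].toList with hcs
  set lp := PySem.Int.floordiv (w - (cs.length : Int)) 2 with hlp
  apply List.ext_getElem
  · simp [PySem.List.length_pyRange_one]
    omega
  · intro c hc1 hc2
    simp only [List.getElem_map, PySem.List.getElem_pyRange_one]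
    have hcW : c < w.toNat := by simp [PySem.List.length_pyRange_one] at hc1; omega
    simp only [pvCellB]
    rw [if_pos (by constructor <;> omega)]
    have hgl : PySem.List.pyGetD L ((T:Int) + (k:Int) - (T:Int)) "" = L[k] := by
      have h0 : (T:Int) + (k:Int) - (T:Int) = ((k:Nat):Int) := by ring
      rw [h0, PySem.List.pyGetD_natCast]
      exact List.getD_eq_getElem L "" hk
    rw [hgl]
    have hmax : max lp 0 = ((lp.toNat : Int)) := by rw [Int.toNat_eq_max]
    rw [← hcs, ← hlp, hmax]
    by_cases h1 : c < lp.toNat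
    · rw [if_neg (by omega)]
      rw [List.getElem_take,
        List.getElem_append_left (by simp; omega),
        List.getElem_append_left (by simp; omega),
        List.getElem_replicate]
    · by_cases h2 : c < lp.toNat + cs.length
      · rw [if_pos (by constructor <;> omega)]
        rw [List.getElem_take,
          List.getElem_append_left (by simp; omega),
          List.getElem_append_right (by simp; omega),
          List.getElem_map]
        have hj : (0:Int) + (c:Int) - ((lp.toNat : Nat) : Int) = ((c - lp.toNat : Nat) : Int) := by omega
        rw [hj, PySem.List.pyGetD_natCast]
        have hjlt : c - lp.toNat < cs.length := by omega
        rw [List.getD_eq_getElem cs ' ' hjlt]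
        congr 2
        simp
      · rw [if_neg (by omega)]
        rw [List.getElem_take,
          List.getElem_append_right (by simp; omega),
          List.getElem_replicate]

-- ===== VERDICT (by name: the statement is the Claim_ definition above) =====
set_option maxHeartbeats 2000000 in
theorem grid_to_pixels_spec : Claim_equal_grid_to_pixels := by
  intro grid_str char_map w h hdom hpre
  obtain ⟨hw, hh⟩ := hpre
  simp only [Spec_grid_to_pixels, grid_to_pixels, grid_to_pixels_alt]
  set cm := PySem.Dict.ofList char_map with hcm
  set lines0 := (((PySem.Str.split? (PySem.Str.strip grid_str) "\n").getD [])).filter (fun l => l ≠ "") with hlines0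
  -- both sides trim to the same list of lines
  have hB : PySem.List.slice lines0 none (some h) = lines0.take h.toNat :=
    PySem.List.slice_to lines0 hh
  have hA : (if h < (lines0.length : Int) then PySem.List.slice lines0 none (some h) else lines0)
      = lines0.take h.toNat := by
    split
    · exact hB
    · exact (List.take_of_length_le (by omega)).symm
  rw [hA, hB]
  set L := lines0.take h.toNat with hL
  have hNH : L.length ≤ h.toNat := by
    rw [hL]; simp
  set N := L.length with hN
  -- the top padding count
  set T := (h.toNat - N) / 2 with hT
  have htop : PySem.Int.floordiv (h - (N : Int)) 2 = (T : Int) := by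
    have h0 : h - (N : Int) = ((h.toNat - N : Nat) : Int) := by omega
    rw [h0]
    exact_mod_cast PySem.Int.floordiv_natCast (h.toNat - N) 2
  rw [htop]
  have hTN : T + N ≤ h.toNat := by omega
  -- A's padding loops become replicates
  rw [PySem.List.foldl_append_singleton_eq_map, PySem.List.foldl_append_singleton_eq_map]
  rw [List.map_const', PySem.List.length_pyRange_one]
  simp only [List.nil_append]
  rw [pvPadRows_eq]
  -- split B's row range at T and T + N
  have hsplit : PySem.List.pyRange 0 h 1
      = PySem.List.pyRange 0 (T : Int) 1 ++ PySem.List.pyRange (T : Int) ((T : Int) + (N : Int)) 1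
        ++ PySem.List.pyRange ((T : Int) + (N : Int)) h 1 := by
    rw [PySem.List.pyRange_one_append 0 (T : Int) h (by omega) (by omega)]
    rw [PySem.List.pyRange_one_append (T : Int) ((T : Int) + (N : Int)) h (by omega) (by omega)]
    rw [List.append_assoc]
  rw [hsplit, List.map_append, List.map_append]
  congr 1
  · congr 1
    · -- top padding rows
      have hc : ∀ r ∈ PySem.List.pyRange 0 (T : Int) 1,
          (PySem.List.pyRange 0 w 1).map (fun c => pvCellB cm L (T : Int) w r c)
            = List.replicate w.toNat "bg" := by
        intro r hr
        rw [PySem.List.mem_pyRange_one] at hr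
        exact pvRowB_bg cm L (T : Int) w r (by omega)
      rw [List.map_congr_left hc, List.map_const', PySem.List.length_pyRange_one]
    · -- the content rows
      rw [PySem.List.pyRange_one (T : Int) ((T : Int) + (N : Int)), List.map_map]
      have hlen : ((T : Int) + (N : Int) - (T : Int)).toNat = N := by omega
      rw [hlen]
      apply List.ext_getElem
      · simp
        exact hN.symm
      · intro k hk1 hk2
        simp only [List.getElem_map, List.getElem_range, Function.comp]
        have hkN : k < N := by simpa using hk1
        exact (pvRowB_eq_rowA cm L T w hw k (by omega)).symm
  · -- bottom padding rows
    have hc : ∀ r ∈ PySem.List.pyRange ((T : Int) + (N : Int)) h 1,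
        (PySem.List.pyRange 0 w 1).map (fun c => pvCellB cm L (T : Int) w r c)
          = List.replicate w.toNat "bg" := by
      intro r hr
      rw [PySem.List.mem_pyRange_one] at hr
      exact pvRowB_bg cm L (T : Int) w r (by omega)
    rw [List.map_congr_left hc, List.map_const', PySem.List.length_pyRange_one]
    congr 1
    simp
    omega
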